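-- pv_equiv track=rewrite | github.com/nizkop/young2matrix | source/ui_parts/canvas_equations/get_number_of_array_rows_in_equation.py | get_number_of_array_rows_in_equation
-- ===== SOURCE A (Python) =====
-- import copy
--
-- def get_number_of_array_rows_in_equation(formula:str) -> int:
--     """
--     determine the number of rows in a latex-array-environment within the given formula
--     :param formula: latex formatted equation
--     :return: number of rows of an array environment
--     """
--     formula = copy.deepcopy(formula)
--     if len(formula.replace(" ","")) == 0:
--         return 0
--     if not r"\\" in formula or not "begin{array}" in formula:
--         return 1
--     start = formula.find("begin{array}")
--     end = formula.find("end{array}")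
--     interesting_part = formula[start+len("begin{array}"):end]
--     interesting_part = interesting_part.replace(r"\\hline","").replace(r"\\quad","").replace(r"\\cline","").replace(r"\\left[","").replace(r"\\right]","")
--     if len(formula[end+len("end{array}"):]) > 0:
--         return max(interesting_part.count(r"\\"), get_number_of_array_rows_in_equation(formula[end+len("end{array}"):]))
--     return interesting_part.count(r"\\")
-- ===== SOURCE B (Python) =====
-- TOKENS = (r"\\hline", r"\\quad", r"\\cline", r"\\left[", r"\\right]")
--
-- def get_number_of_array_rows_in_equation(formula: str) -> int:
--     """Two-stage re-implementation: first collect the row count of every array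
--     environment into a list with a cursor loop, then return the max of those
--     counts together with the terminal 0/1 value of the leftover suffix."""
--     counts = []
--     s = formula
--     while s.replace(" ", "") != "" and r"\\" in s and "begin{array}" in s:
--         inner = s[s.find("begin{array}") + 12 : s.find("end{array}")]
--         for tok in TOKENS:
--             inner = inner.replace(tok, "")
--         counts.append(inner.count(r"\\"))
--         s = s[s.find("end{array}") + 10 :]
--     tail = 0 if s.replace(" ", "") == "" else 1
--     return max([tail] + counts)
-- ===== Notes on version B (the rewrite author's own statement) =====
-- stated objective: alternative
-- what changed: Replaces A's suffix recursion by a two-stage pass: a cursor loop that collects each array environment's row count into a list (with the replace chain turned into a for-loop over a token tuple), then one max over that list together with the terminal 0/1 value of the leftover suffix.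
import Mathlib
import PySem

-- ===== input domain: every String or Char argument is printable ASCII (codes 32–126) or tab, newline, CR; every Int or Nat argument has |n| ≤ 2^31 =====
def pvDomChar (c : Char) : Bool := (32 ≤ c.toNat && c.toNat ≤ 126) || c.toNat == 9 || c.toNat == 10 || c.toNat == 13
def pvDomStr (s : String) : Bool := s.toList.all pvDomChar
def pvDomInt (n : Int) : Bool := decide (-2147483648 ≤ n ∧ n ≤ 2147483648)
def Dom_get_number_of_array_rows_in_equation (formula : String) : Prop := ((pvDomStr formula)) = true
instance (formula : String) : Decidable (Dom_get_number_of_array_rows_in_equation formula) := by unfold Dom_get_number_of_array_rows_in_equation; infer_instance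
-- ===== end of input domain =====

-- B replaces A's suffix recursion by a two-stage pass: collect each array's row count
-- into a list, then take the max of the list together with the terminal 0/1 value.
-- Objective: alternative decomposition, same cost.

-- ===== PORT A =====
-- A's chained .replace cleaning of the inner part
def pvClean (s : List Char) : List Char :=
  PySem.Chars.replace
    (PySem.Chars.replace
      (PySem.Chars.replace
        (PySem.Chars.replace
          (PySem.Chars.replace s "\\\\hline".toList "".toList)
          "\\\\quad".toList "".toList)
        "\\\\cline".toList "".toList)
      "\\\\left[".toList "".toList)
    "\\\\right]".toList "".toList

-- formula[end+len("end{array}"):]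
def pvRest (s : List Char) : List Char :=
  PySem.Chars.slice s (some (PySem.Chars.find s "end{array}".toList + 10)) none

-- interesting_part.count(r"\\") after the replace chain
def pvInnerCount (s : List Char) : Nat :=
  PySem.Chars.count
    (pvClean (PySem.Chars.slice s (some (PySem.Chars.find s "begin{array}".toList + 12))
      (some (PySem.Chars.find s "end{array}".toList))))
    "\\\\".toList

-- A's recursion, fuel = length of the remaining string + 1 (each recursive call strictly shortens the string)
def pvARec (fuel : Nat) (s : List Char) : Int :=
  match fuel with
  | 0 => 0  -- unreachable: the fuel supplied always suffices
  | fuel + 1 =>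
    if PySem.Chars.replace s " ".toList "".toList = [] then 0
    else if ¬ (PySem.Chars.isIn "\\\\".toList s = true ∧ PySem.Chars.isIn "begin{array}".toList s = true) then 1
    else if (pvRest s).length > 0 then
      max (pvInnerCount s : Int) (pvARec fuel (pvRest s))
    else (pvInnerCount s : Int)

def get_number_of_array_rows_in_equation (formula : String) : Int :=
  pvARec (formula.toList.length + 1) formula.toList

-- ===== PORT B =====
-- the tuple TOKENS of Source B
def pvTok : List (List Char) :=
  ["\\\\hline".toList, "\\\\quad".toList, "\\\\cline".toList, "\\\\left[".toList, "\\\\right]".toList]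

-- one loop body of Source B: (this array's row count, the suffix the cursor moves to)
def pvStep (s : List Char) : Nat × List Char :=
  let inner := PySem.Chars.slice s
    (some (PySem.Chars.find s "begin{array}".toList + 12))
    (some (PySem.Chars.find s "end{array}".toList))
  let stripped := pvTok.foldl (fun acc tok => PySem.Chars.replace acc tok []) inner
  (PySem.Chars.count stripped "\\\\".toList,
   PySem.Chars.slice s (some (PySem.Chars.find s "end{array}".toList + 10)) none)

-- the while-condition of Source B
def pvCond (s : List Char) : Bool :=
  !(PySem.Chars.replace s " ".toList [] == []) &&
  PySem.Chars.isIn "\\\\".toList s && PySem.Chars.isIn "begin{array}".toList s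

-- stage 1: the list `counts` and the final cursor value (fuel port of the while loop)
def pvCollect : Nat → List Char → List Nat × List Char
  | 0, s => ([], s)  -- unreachable: the fuel supplied always suffices
  | fuel + 1, s =>
    if pvCond s then
      let step := pvStep s
      let tl := pvCollect fuel step.2
      (step.1 :: tl.1, tl.2)
    else ([], s)

def get_number_of_array_rows_in_equation_alt (formula : String) : Int :=
  let run := pvCollect (formula.toList.length + 1) formula.toList
  let tail : Int := if PySem.Chars.replace run.2 " ".toList [] = [] then 0 else 1
  (run.1.map Int.ofNat).foldl max tail

-- ===== PRECONDITION & SPEC =====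
def Spec_get_number_of_array_rows_in_equation (formula : String) (out : Int) : Prop := out = get_number_of_array_rows_in_equation_alt formula
instance (formula : String) (out : Int) : Decidable (Spec_get_number_of_array_rows_in_equation formula out) := by unfold Spec_get_number_of_array_rows_in_equation; infer_instance

-- ===== CLAIM (what is proved, stated in full; the proofs are below) =====
def Claim_equal_get_number_of_array_rows_in_equation : Prop := ∀ (formula : String), Dom_get_number_of_array_rows_in_equation formula → Spec_get_number_of_array_rows_in_equation formula (get_number_of_array_rows_in_equation formula)

-- ===== LEMMAS AND PROOFS =====

-- folding max commutes with an initial max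
theorem foldl_max_max (l : List Int) (a b : Int) :
    l.foldl max (max a b) = max a (l.foldl max b) := by
  induction l generalizing b with
  | nil => rfl
  | cons c l ih => simpa [List.foldl, max_assoc] using ih (max b c)

-- the same, with the initial max flipped
theorem foldl_max_shift (l : List Int) (a b : Int) :
    l.foldl max (max b a) = max a (l.foldl max b) := by
  rw [max_comm]; exact foldl_max_max l a b

-- B's loop condition unpacked
theorem pvCond_eq_true_iff (s : List Char) :
    pvCond s = true ↔
      (PySem.Chars.replace s " ".toList [] ≠ [] ∧
       PySem.Chars.isIn "\\\\".toList s = true ∧ PySem.Chars.isIn "begin{array}".toList s = true) := by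
  simp [pvCond, and_assoc]

-- B's per-step count is A's per-step count
theorem pvStep_fst (s : List Char) : (pvStep s).1 = pvInnerCount s := by
  simp [pvStep, pvTok, pvInnerCount, pvClean, List.foldl]

theorem pvStep_snd (s : List Char) : (pvStep s).2 = pvRest s := rfl

-- the cursor strictly shortens while the loop condition holds
theorem pvRest_length_lt (s : List Char) (h2 : PySem.Chars.isIn "\\\\".toList s = true) :
    (pvRest s).length < s.length := by
  have hs : s ≠ [] := by
    intro hnil; rw [hnil] at h2; exact absurd h2 (by decide)
  have hfind : -1 ≤ PySem.Chars.find s "end{array}".toList := PySem.Chars.neg_one_le_find _ _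
  unfold pvRest
  rw [PySem.Chars.slice_eq_listSlice, PySem.List.slice_from _ (by omega)]
  have hlen : 0 < s.length := List.length_pos_iff.mpr hs
  simp only [List.length_drop]
  omega

-- the collector stops immediately on the empty string
theorem pvCollect_nil (fuel : Nat) : pvCollect fuel [] = ([], []) := by
  cases fuel with
  | zero => rfl
  | succ n =>
    have h : pvCond [] = false := by decide
    simp [pvCollect, h]

-- main invariant: with sufficient fuel, A's recursion equals B's collect-then-max
theorem pvARec_eq_payoff (fuel : Nat) (s : List Char) (hfuel : s.length < fuel) :
    pvARec fuel s =
      ((pvCollect fuel s).1.map Int.ofNat).foldl max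
        (if PySem.Chars.replace (pvCollect fuel s).2 " ".toList [] = [] then 0 else 1) := by
  induction fuel generalizing s with
  | zero => omega
  | succ n ih =>
    by_cases hc : pvCond s = true
    · obtain ⟨h1, h2, h3⟩ := (pvCond_eq_true_iff s).mp hc
      unfold pvARec pvCollect
      rw [if_neg (by simpa using h1), if_neg (not_not_intro ⟨h2, h3⟩), if_pos hc]
      simp only [pvStep_fst, pvStep_snd]
      by_cases hr : (pvRest s).length > 0
      · rw [if_pos hr]
        have hlt : (pvRest s).length < n := lt_of_lt_of_le (pvRest_length_lt s h2) (by omega)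
        rw [ih (pvRest s) hlt]
        rw [List.map_cons, List.foldl_cons, foldl_max_shift]
        rfl
      · rw [if_neg hr]
        have hnil : pvRest s = [] := List.eq_nil_of_length_eq_zero (by omega)
        have hrepl : PySem.Chars.replace ([] : List Char) " ".toList [] = [] := by decide
        simp only [hnil, pvCollect_nil, hrepl, if_pos, List.map_cons, List.map_nil,
          List.foldl_cons, List.foldl_nil, Int.ofNat_eq_natCast]
        omega
    · unfold pvARec pvCollect
      rw [if_neg hc]
      by_cases h1 : PySem.Chars.replace s " ".toList "".toList = []
      · rw [if_pos h1]
        simp only [List.map_nil, List.foldl_nil]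
        rw [if_pos (by simpa using h1)]
      · rw [if_neg h1]
        have h2 : ¬ (PySem.Chars.isIn "\\\\".toList s = true ∧ PySem.Chars.isIn "begin{array}".toList s = true) := by
          intro h2
          exact hc ((pvCond_eq_true_iff s).mpr ⟨by simpa using h1, h2⟩)
        rw [if_pos h2]
        simp only [List.map_nil, List.foldl_nil]
        rw [if_neg (by simpa using h1)]

-- ===== VERDICT (by name: the statement is the Claim_ definition above) =====
theorem get_number_of_array_rows_in_equation_spec : Claim_equal_get_number_of_array_rows_in_equation := by
  intro formula _
  unfold Spec_get_number_of_array_rows_in_equation get_number_of_array_rows_in_equation get_number_of_array_rows_in_equation_alt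
  rw [pvARec_eq_payoff _ _ (by omega)]
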